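-- pv_equiv track=rewrite | github.com/San0s-o/SWOT | app/engine/arena_rush_timing.py | opening_order_penalty
-- ===== SOURCE A (Python) =====
-- from typing import Dict, List, Sequence
--
-- def opening_order_penalty(expected_order: Sequence[int], observed_order: Sequence[int]) -> int:
--     expected = [int(uid) for uid in expected_order]
--     observed = [int(uid) for uid in observed_order]
--     if not expected:
--         return 0
--     penalty = 0
--     for idx, expected_uid in enumerate(expected):
--         if idx >= len(observed):
--             penalty += (len(expected) - idx) * 5
--             break
--         if int(observed[idx]) == int(expected_uid):
--             continue
--         penalty += int(1 + idx)
--     return int(penalty)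
-- ===== SOURCE B (Python) =====
-- from typing import Sequence
--
-- def opening_order_penalty(expected_order: Sequence[int], observed_order: Sequence[int]) -> int:
--     expected = [int(uid) for uid in expected_order]
--     observed = [int(uid) for uid in observed_order]
--     # Walk the overlap back-to-front keeping a running count of mismatches seen so far
--     # (i.e. mismatches at or after the current position); adding that count at every
--     # position yields sum(1 + idx) over mismatch indices without computing any index.
--     penalty = 5 * max(0, len(expected) - len(observed))
--     count = 0
--     for e, o in reversed(list(zip(expected, observed))):
--         if e != o:
--             count += 1
--         penalty += count
--     return int(penalty)
-- ===== Notes on version B (the rewrite author's own statement) =====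
-- stated objective: alternative
-- what changed: Replaced A's forward indexed loop (adding 1+idx per mismatch, break with (len-idx)*5 tail) by a back-to-front scan over the zipped overlap that keeps only a running suffix-mismatch count and adds it at every position (using sum(1+idx over mismatches) = sum over positions of mismatches-at-or-after), with the tail penalty as the closed-form start value 5*max(0, len(expected)-len(observed)).
import Mathlib
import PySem

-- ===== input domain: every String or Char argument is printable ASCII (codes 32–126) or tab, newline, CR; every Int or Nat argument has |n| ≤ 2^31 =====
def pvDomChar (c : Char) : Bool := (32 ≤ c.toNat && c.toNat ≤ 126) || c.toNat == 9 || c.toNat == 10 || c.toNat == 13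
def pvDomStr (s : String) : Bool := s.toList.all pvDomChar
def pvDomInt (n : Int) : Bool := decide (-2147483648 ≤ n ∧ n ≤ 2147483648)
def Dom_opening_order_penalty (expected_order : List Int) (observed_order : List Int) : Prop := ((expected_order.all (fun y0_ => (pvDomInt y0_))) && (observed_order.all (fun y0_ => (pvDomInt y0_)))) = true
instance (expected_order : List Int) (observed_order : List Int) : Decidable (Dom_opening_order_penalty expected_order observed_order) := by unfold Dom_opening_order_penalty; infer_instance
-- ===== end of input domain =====

-- B replaces A's forward indexed loop by a back-to-front scan keeping a running
-- suffix-mismatch count (no per-index weight), tail penalty as a closed-form start value.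

-- ===== PORT A =====
-- A's for-loop over enumerate(expected) with an early break; idx is the loop index,
-- observed[idx] is read via pyGet? (in range on the branch where it is read).
def pvALoop (expected observed : List Int) (idx : Nat) (lenE : Int) (pen : Int) : Int :=
  match expected with
  | [] => pen
  | e :: rest =>
    if (idx : Int) ≥ (observed.length : Int) then pen + (lenE - (idx : Int)) * 5
    else
      match PySem.List.pyGet? observed (idx : Int) with
      | none => pen  -- unreachable: idx < len(observed) on this branch
      | some o =>
        if o = e then pvALoop rest observed (idx + 1) lenE pen
        else pvALoop rest observed (idx + 1) lenE (pen + (1 + (idx : Int)))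

def opening_order_penalty (expected_order : List Int) (observed_order : List Int) : Int :=
  let expected := expected_order
  let observed := observed_order
  if expected = [] then 0
  else pvALoop expected observed 0 (expected.length : Int) 0

-- ===== PORT B =====
-- Source B: penalty starts at 5*max(0, lenE-lenO); then for (e,o) over reversed(zip),
-- bump the mismatch count on e != o and add the count each iteration.
def opening_order_penalty_alt (expected_order : List Int) (observed_order : List Int) : Int :=
  let expected := expected_order
  let observed := observed_order
  let res := (expected.zip observed).reverse.foldl
    (fun (st : Int × Int) (p : Int × Int) =>
      let c := if p.1 ≠ p.2 then st.2 + 1 else st.2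
      (st.1 + c, c))
    (5 * max 0 ((expected.length : Int) - (observed.length : Int)), 0)
  res.1

-- ===== PRECONDITION & SPEC =====
def Spec_opening_order_penalty (expected_order : List Int) (observed_order : List Int) (out : Int) : Prop := out = opening_order_penalty_alt expected_order observed_order
instance (expected_order : List Int) (observed_order : List Int) (out : Int) : Decidable (Spec_opening_order_penalty expected_order observed_order out) := by unfold Spec_opening_order_penalty; infer_instance

-- ===== CLAIM (what is proved, stated in full; the proofs are below) =====
def Claim_equal_opening_order_penalty : Prop := ∀ (expected_order : List Int) (observed_order : List Int), Dom_opening_order_penalty expected_order observed_order → Spec_opening_order_penalty expected_order observed_order (opening_order_penalty expected_order observed_order)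

-- ===== LEMMAS AND PROOFS =====

-- number of mismatched pairs
def pvC : List (Int × Int) → Int
  | [] => 0
  | p :: r => (if p.2 ≠ p.1 then 1 else 0) + pvC r

-- index-weighted mismatch sum (weight 1+idx), in recursive form
def pvM : List (Int × Int) → Int
  | [] => 0
  | p :: r => (if p.2 ≠ p.1 then 1 else 0) + pvM r + pvC r

-- the per-position contribution of the enumerate-based sum
def pvG (p : Int × Int × Int) : Int := if p.2.2 ≠ p.2.1 then 1 + p.1 else 0

theorem pvEnum_sum (l : List (Int × Int)) (k : Int) :
    ((PySem.List.enumerate l k).map pvG).sum = pvM l + k * pvC l := by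
  induction l generalizing k with
  | nil => simp [pvM, pvC]
  | cons x xs ih =>
    simp only [PySem.List.enumerate_cons, List.map_cons, List.sum_cons, pvM, pvC, pvG]
    rw [ih (k + 1)]
    split_ifs <;> ring

-- A's loop equals the prefix mismatch sum (from the same start index) plus the tail term.
theorem pvALoop_eq (expected : List Int) (observed : List Int) (idx : Nat) (lenE pen : Int)
    (hidx : idx ≤ observed.length) :
    pvALoop expected observed idx lenE pen =
      pen
      + ((PySem.List.enumerate (expected.zip (observed.drop idx)) (idx : Int)).map pvG).sum
      + (if observed.length < idx + expected.length then
           (lenE - (observed.length : Int)) * 5 else 0) := by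
  induction expected generalizing idx pen with
  | nil =>
    simp [pvALoop]
    omega
  | cons e rest ih =>
    by_cases h : observed.length ≤ idx
    · have hidx' : idx = observed.length := le_antisymm hidx h
      simp [pvALoop, hidx', List.drop_length]
    · rw [not_le] at h
      have hget : PySem.List.pyGet? observed (idx : Int) = some observed[idx] := by
        rw [PySem.List.pyGet?_natCast]
        simp [List.getElem?_eq_getElem h]
      have hdrop : observed.drop idx = observed[idx] :: observed.drop (idx + 1) :=
        List.drop_eq_getElem_cons h
      have hcond : (observed.length < idx + (rest.length + 1)) ↔
          (observed.length < (idx + 1) + rest.length) := by omega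
      have hlt : ¬ ((idx : Int) ≥ (observed.length : Int)) := by
        rw [not_le]; exact_mod_cast h
      have hle : idx + 1 ≤ observed.length := h
      have hstep : pvALoop (e :: rest) observed idx lenE pen =
          if observed[idx] = e then pvALoop rest observed (idx + 1) lenE pen
          else pvALoop rest observed (idx + 1) lenE (pen + (1 + (idx : Int))) := by
        simp only [pvALoop, hget]
        rw [if_neg hlt]
        rfl
      rw [hstep, hdrop]
      simp only [List.zip_cons_cons, PySem.List.enumerate_cons, List.map_cons, List.sum_cons,
        List.length_cons]
      rw [ih (idx + 1) pen hle, ih (idx + 1) (pen + (1 + (idx : Int))) hle]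
      push_cast
      simp only [pvG]
      split_ifs <;> omega

-- B's fold, run right-to-left via foldr, in closed form: the accumulated penalty is
-- p0 + c0 * |l| + pvM l and the final count is c0 + pvC l.
theorem pvBfold_eq (l : List (Int × Int)) (p0 c0 : Int) :
    l.foldr (fun (p : Int × Int) (st : Int × Int) =>
        let c := if p.1 ≠ p.2 then st.2 + 1 else st.2
        (st.1 + c, c)) (p0, c0)
      = (p0 + c0 * l.length + pvM l, c0 + pvC l) := by
  induction l with
  | nil => simp [pvM, pvC]
  | cons x xs ih =>
    simp only [List.foldr_cons, ih, pvM, pvC, List.length_cons]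
    rcases eq_or_ne x.2 x.1 with h | h
    · rw [if_neg (by simp [h]), if_neg (by simp [h]), Prod.mk.injEq]
      constructor <;> (push_cast; ring)
    · rw [if_pos (Ne.symm h), if_pos h, Prod.mk.injEq]
      constructor <;> (push_cast; ring)

-- ===== VERDICT (by name: the statement is the Claim_ definition above) =====
theorem opening_order_penalty_spec : Claim_equal_opening_order_penalty := by
  intro e o _
  unfold Spec_opening_order_penalty
  simp only [opening_order_penalty, opening_order_penalty_alt]
  rw [List.foldl_reverse]
  have hfold := pvBfold_eq (e.zip o) (5 * max 0 ((e.length : Int) - (o.length : Int))) 0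
  simp only [hfold]
  by_cases he : e = []
  · subst he
    simp [pvM]
  · simp only [he, if_false]
    rw [pvALoop_eq e o 0 (e.length : Int) 0 (Nat.zero_le _)]
    simp only [Nat.cast_zero, List.drop_zero, Nat.zero_add]
    rw [pvEnum_sum]
    have hmax : 5 * max 0 ((e.length : Int) - (o.length : Int))
        = (if o.length < e.length then ((e.length : Int) - (o.length : Int)) * 5 else 0) := by
      split_ifs with h
      · have : (o.length : Int) < (e.length : Int) := by exact_mod_cast h
        rw [max_eq_right (by omega)]; ring
      · have : ¬ ((o.length : Int) < (e.length : Int)) := by exact_mod_cast h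
        rw [max_eq_left (by omega)]; ring
    rw [hmax]
    ring
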